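-- pv_equiv track=rewrite | github.com/miethe/MeatyMusic | services/api/app/services/common.py | _normalize_l33t_speak
-- ===== SOURCE A (Python) =====
-- def _normalize_l33t_speak(text: str) -> str:
--     """Convert l33t speak to normal text.
--
--     Args:
--         text: Text potentially containing l33t speak
--
--     Returns:
--         Normalized text with l33t speak converted
--
--     Example:
--         >>> _normalize_l33t_speak("sh1t")
--         "shit"
--         >>> _normalize_l33t_speak("f@ck")
--         "fuck"
--     """
--     normalized = text.lower()
--
--     # Replace l33t speak characters with their letter equivalents
--     replacements = {
--         '@': 'a', '4': 'a', '^': 'a',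
--         '3': 'e',
--         '1': 'i', '!': 'i', '|': 'i',
--         '0': 'o',
--         '$': 's', '5': 's', 'z': 's',
--         '7': 't', '+': 't',
--         '9': 'g', '6': 'g',
--         '8': 'b',
--         '<': 'c', '(': 'c',
--         '#': 'h',
--     }
--
--     for l33t_char, normal_char in replacements.items():
--         normalized = normalized.replace(l33t_char, normal_char)
--
--     return normalized
-- ===== SOURCE B (Python) =====
-- def _normalize_l33t_speak(text: str) -> str:
--     """Convert l33t speak to normal text: one pass with an if/elif character classifier."""
--     out = []
--     for ch in text.lower():
--         if ch == '@' or ch == '4' or ch == '^':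
--             out.append('a')
--         elif ch == '3':
--             out.append('e')
--         elif ch == '1' or ch == '!' or ch == '|':
--             out.append('i')
--         elif ch == '0':
--             out.append('o')
--         elif ch == '$' or ch == '5' or ch == 'z':
--             out.append('s')
--         elif ch == '7' or ch == '+':
--             out.append('t')
--         elif ch == '9' or ch == '6':
--             out.append('g')
--         elif ch == '8':
--             out.append('b')
--         elif ch == '<' or ch == '(':
--             out.append('c')
--         elif ch == '#':
--             out.append('h')
--         else:
--             out.append(ch)
--     return ''.join(out)
-- ===== Notes on version B (the rewrite author's own statement) =====
-- stated objective: simpler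
-- what changed: A does 19 sequential full-string replace passes driven by a dict; B drops the dict entirely and makes one pass over the lowered string, classifying each character with an if/elif chain and accumulating the output; equivalent because every replacement is one character, no replacement value is itself a key, and the input is lowercased first.
import Mathlib
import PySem

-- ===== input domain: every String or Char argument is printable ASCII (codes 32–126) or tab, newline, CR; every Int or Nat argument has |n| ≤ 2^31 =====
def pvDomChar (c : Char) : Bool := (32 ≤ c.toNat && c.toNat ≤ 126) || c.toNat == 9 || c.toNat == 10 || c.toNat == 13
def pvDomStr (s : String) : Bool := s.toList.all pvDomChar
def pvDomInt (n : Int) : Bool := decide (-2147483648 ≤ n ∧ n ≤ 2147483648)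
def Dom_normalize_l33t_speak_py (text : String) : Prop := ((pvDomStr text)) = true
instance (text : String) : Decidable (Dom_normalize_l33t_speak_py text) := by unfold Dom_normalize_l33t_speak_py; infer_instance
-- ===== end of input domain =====

-- B replaces A's 19 sequential dict-driven full-string replace passes by one accumulator
-- pass over the lowered string with an if/elif character classifier (objective: simpler).

-- ===== PORT A =====
-- the dict literal of A, in insertion order (single-char keys/values kept as Char)
def l33tDictA : PySem.Dict Char Char := PySem.Dict.ofList
  [('@','a'), ('4','a'), ('^','a'), ('3','e'), ('1','i'), ('!','i'), ('|','i'),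
   ('0','o'), ('$','s'), ('5','s'), ('z','s'), ('7','t'), ('+','t'),
   ('9','g'), ('6','g'), ('8','b'), ('<','c'), ('(','c'), ('#','h')]

def normalize_l33t_speak_py (text : String) : String :=
  let normalized := PySem.Str.lower text
  l33tDictA.items.foldl
    (fun acc kv => PySem.Str.replace acc (String.ofList [kv.1]) (String.ofList [kv.2]))
    normalized

-- ===== PORT B =====
-- B's per-character if/elif classifier
def l33tChar (ch : Char) : Char :=
  if ch = '@' ∨ ch = '4' ∨ ch = '^' then 'a'
  else if ch = '3' then 'e'
  else if ch = '1' ∨ ch = '!' ∨ ch = '|' then 'i'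
  else if ch = '0' then 'o'
  else if ch = '$' ∨ ch = '5' ∨ ch = 'z' then 's'
  else if ch = '7' ∨ ch = '+' then 't'
  else if ch = '9' ∨ ch = '6' then 'g'
  else if ch = '8' then 'b'
  else if ch = '<' ∨ ch = '(' then 'c'
  else if ch = '#' then 'h'
  else ch

-- B's loop: walk the characters, appending each classified character to the output
def l33tLoop : List Char → List Char
  | [] => []
  | ch :: rest => l33tChar ch :: l33tLoop rest

def normalize_l33t_speak_py_alt (text : String) : String :=
  String.ofList (l33tLoop (PySem.Chars.lower text.toList))

-- ===== PRECONDITION & SPEC =====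
def Spec_normalize_l33t_speak_py (text : String) (out : String) : Prop := out = normalize_l33t_speak_py_alt text
instance (text : String) (out : String) : Decidable (Spec_normalize_l33t_speak_py text out) := by unfold Spec_normalize_l33t_speak_py; infer_instance

-- ===== CLAIM (what is proved, stated in full; the proofs are below) =====
def Claim_equal_normalize_l33t_speak_py : Prop := ∀ (text : String), Dom_normalize_l33t_speak_py text → Spec_normalize_l33t_speak_py text (normalize_l33t_speak_py text)

-- ===== LEMMAS AND PROOFS =====

-- replacing a single-char pattern by a single-char replacement is a pointwise map
lemma replace_go_single (o n : Char) : ∀ (l : List Char) (acc : List Char) (fuel : Nat),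
    l.length ≤ fuel →
    PySem.Chars.replace.go [o] [n] fuel l acc
      = acc.reverse ++ l.map (fun c => if c == o then n else c) := by
  intro l
  induction l with
  | nil =>
      intro acc fuel _
      cases fuel <;> simp [PySem.Chars.replace.go]
  | cons c t ih =>
      intro acc fuel hf
      cases fuel with
      | zero => simp at hf
      | succ fuel =>
        have hft : t.length ≤ fuel := by simpa using hf
        simp only [PySem.Chars.replace.go]
        by_cases h : o = c
        · subst h
          simp [List.isPrefixOf, ih _ fuel hft]
        · simp [List.isPrefixOf, h, ih _ fuel hft, Ne.symm h]

lemma replace_single (cs : List Char) (o n : Char) :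
    PySem.Chars.replace cs [o] [n] = cs.map (fun c => if c == o then n else c) := by
  have h := replace_go_single o n cs [] cs.length (le_refl _)
  simpa [PySem.Chars.replace] using h

-- a fold of pointwise maps is one map of the folded per-character function
lemma fold_map_comm (ps : List (Char × Char)) : ∀ (cs : List Char),
    ps.foldl (fun acc kv => acc.map (fun c => if c == kv.1 then kv.2 else c)) cs
      = cs.map (fun c => ps.foldl (fun x kv => if x == kv.1 then kv.2 else x) c) := by
  induction ps with
  | nil => intro cs; simp
  | cons p ps ih =>
      intro cs
      simp only [List.foldl_cons, ih, List.map_map]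
      rfl

-- the String-level replace fold is the List-level replace fold
lemma str_fold_bridge (ps : List (Char × Char)) : ∀ (s : String),
    ps.foldl (fun acc kv => PySem.Str.replace acc (String.ofList [kv.1]) (String.ofList [kv.2])) s
      = String.ofList (ps.foldl (fun acc kv => PySem.Chars.replace acc [kv.1] [kv.2]) s.toList) := by
  induction ps with
  | nil => intro s; simp
  | cons p ps ih =>
      intro s
      rw [List.foldl_cons, List.foldl_cons, ih]
      simp [PySem.Str.replace]

-- B's accumulator loop is the pointwise map of its classifier
lemma l33tLoop_eq_map (cs : List Char) : l33tLoop cs = cs.map l33tChar := by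
  induction cs with
  | nil => rfl
  | cons c t ih => simp [l33tLoop, ih]

-- per character, A's chain of substitutions is B's classifier
lemma point_eq (c : Char) :
    l33tDictA.items.foldl (fun x kv => if x == kv.1 then kv.2 else x) c = l33tChar c := by
  have hA : l33tDictA.items = [('@','a'), ('4','a'), ('^','a'), ('3','e'), ('1','i'), ('!','i'), ('|','i'),
   ('0','o'), ('$','s'), ('5','s'), ('z','s'), ('7','t'), ('+','t'),
   ('9','g'), ('6','g'), ('8','b'), ('<','c'), ('(','c'), ('#','h')] := by decide
  by_cases h0 : c = '@'
  · subst h0; decide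
  by_cases h1 : c = '4'
  · subst h1; decide
  by_cases h2 : c = '^'
  · subst h2; decide
  by_cases h3 : c = '3'
  · subst h3; decide
  by_cases h4 : c = '1'
  · subst h4; decide
  by_cases h5 : c = '!'
  · subst h5; decide
  by_cases h6 : c = '|'
  · subst h6; decide
  by_cases h7 : c = '0'
  · subst h7; decide
  by_cases h8 : c = '$'
  · subst h8; decide
  by_cases h9 : c = '5'
  · subst h9; decide
  by_cases h10 : c = 'z'
  · subst h10; decide
  by_cases h11 : c = '7'
  · subst h11; decide
  by_cases h12 : c = '+'
  · subst h12; decide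
  by_cases h13 : c = '9'
  · subst h13; decide
  by_cases h14 : c = '6'
  · subst h14; decide
  by_cases h15 : c = '8'
  · subst h15; decide
  by_cases h16 : c = '<'
  · subst h16; decide
  by_cases h17 : c = '('
  · subst h17; decide
  by_cases h18 : c = '#'
  · subst h18; decide
  rw [hA]
  simp [l33tChar, h0, h1, h2, h3, h4, h5, h6, h7, h8, h9, h10, h11, h12, h13, h14, h15, h16, h17, h18, Ne.symm h0, Ne.symm h1, Ne.symm h2, Ne.symm h3, Ne.symm h4, Ne.symm h5, Ne.symm h6, Ne.symm h7, Ne.symm h8, Ne.symm h9, Ne.symm h10, Ne.symm h11, Ne.symm h12, Ne.symm h13, Ne.symm h14, Ne.symm h15, Ne.symm h16, Ne.symm h17]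

-- ===== VERDICT (by name: the statement is the Claim_ definition above) =====
theorem normalize_l33t_speak_py_spec : Claim_equal_normalize_l33t_speak_py := by
  intro text _
  unfold Spec_normalize_l33t_speak_py normalize_l33t_speak_py normalize_l33t_speak_py_alt
  have hfun : (fun (acc : List Char) (kv : Char × Char) => PySem.Chars.replace acc [kv.1] [kv.2])
      = (fun acc kv => acc.map (fun c => if c == kv.1 then kv.2 else c)) := by
    funext acc kv; exact replace_single acc kv.1 kv.2
  rw [str_fold_bridge]
  simp only [PySem.Str.toList_lower, hfun, fold_map_comm, point_eq, l33tLoop_eq_map]
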